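-- pv_equiv track=rewrite | github.com/kimkimgungunwoo/codingteststudy | 백준/골드/G4_1107_리모컨.py | check_can
-- ===== SOURCE A (Python) =====
-- def check_can(ccN, bblist):
--     if ccN==0:
--         if 0 in bblist:
--             return False
--         else:
--             return True
--     if ccN<0:
--         return False
--     tempN = ccN
--     while tempN >=1:
--         last_digit = tempN % 10
--         if last_digit in bblist:
--             return False
--         else:
--             tempN //= 10  # 정수 나눗셈으로 변경
--     return True
-- ===== SOURCE B (Python) =====
-- def check_can(ccN, bblist):
--     if ccN < 0:
--         return False
--     bad = {str(b) for b in bblist}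
--     return all(d not in bad for d in str(ccN))
-- ===== Notes on version B (the rewrite author's own statement) =====
-- stated objective: idiomatic
-- what changed: Replaces the %10//10 arithmetic digit-peeling loop (with its separate ccN==0 special case) by building a set of the broken buttons' string forms once and testing every character of str(ccN) against it with all(...).
import Mathlib
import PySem

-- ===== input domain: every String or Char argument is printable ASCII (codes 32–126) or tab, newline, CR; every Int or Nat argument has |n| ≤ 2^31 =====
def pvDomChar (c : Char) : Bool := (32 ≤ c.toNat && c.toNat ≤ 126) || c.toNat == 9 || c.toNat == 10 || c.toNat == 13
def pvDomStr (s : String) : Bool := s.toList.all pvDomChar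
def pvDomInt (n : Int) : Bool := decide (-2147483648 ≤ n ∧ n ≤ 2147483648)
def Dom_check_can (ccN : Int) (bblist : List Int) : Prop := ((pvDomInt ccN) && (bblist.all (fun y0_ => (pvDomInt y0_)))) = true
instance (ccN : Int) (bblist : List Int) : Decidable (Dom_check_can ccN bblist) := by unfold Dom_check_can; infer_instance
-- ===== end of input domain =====

-- B replaces the arithmetic %10 / //10 digit-peeling loop with a membership test of the
-- characters of str(ccN) against the set of string forms of the broken buttons (objective: idiomatic).

-- ===== PORT A =====
-- the 'while tempN >= 1' loop with its two early-return branches, as structural recursion on tempN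
def checkCanLoop (tempN : Int) (bblist : List Int) : Bool :=
  if _h : tempN ≥ 1 then
    if bblist.contains (PySem.Int.mod tempN 10) then false
    else checkCanLoop (PySem.Int.floordiv tempN 10) bblist
  else true
termination_by tempN.toNat
decreasing_by
  have h10 : PySem.Int.floordiv tempN 10 = tempN / 10 :=
    PySem.Int.floordiv_eq_ediv_of_pos (by omega)
  rw [h10]; omega

def check_can (ccN : Int) (bblist : List Int) : Bool :=
  if ccN = 0 then
    if bblist.contains 0 then false else true
  else if ccN < 0 then false
  else checkCanLoop ccN bblist

-- ===== PORT B =====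
def check_can_alt (ccN : Int) (bblist : List Int) : Bool :=
  if ccN < 0 then false
  else
    let bad : PySem.Set String := PySem.Set.ofList (bblist.map PySem.Int.toStr)
    (PySem.Int.toStr ccN).toList.all (fun d => !(PySem.Set.contains bad (String.ofList [d])))

-- ===== PRECONDITION & SPEC =====
def Spec_check_can (ccN : Int) (bblist : List Int) (out : Bool) : Prop := out = check_can_alt ccN bblist
instance (ccN : Int) (bblist : List Int) (out : Bool) : Decidable (Spec_check_can ccN bblist out) := by unfold Spec_check_can; infer_instance

-- ===== CLAIM (what is proved, stated in full; the proofs are below) =====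
def Claim_equal_check_can : Prop := ∀ (ccN : Int) (bblist : List Int), Dom_check_can ccN bblist → Spec_check_can ccN bblist (check_can ccN bblist)

-- ===== LEMMAS AND PROOFS =====

-- one unfolding step of Nat.toDigitsCore in base 10
lemma toDigitsCore_succ (f n : Nat) (l : List Char) :
    Nat.toDigitsCore 10 (f + 1) n l =
      if n / 10 = 0 then (n % 10).digitChar :: l
      else Nat.toDigitsCore 10 f (n / 10) ((n % 10).digitChar :: l) := rfl

-- toDigitsCore appends to its accumulator
lemma toDigitsCore_acc (b f : Nat) : ∀ (n : Nat) (l : List Char),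
    Nat.toDigitsCore b f n l = Nat.toDigitsCore b f n [] ++ l := by
  induction f with
  | zero => intro n l; simp [Nat.toDigitsCore]
  | succ f ih =>
    intro n l
    simp only [Nat.toDigitsCore]
    by_cases h : n / b = 0
    · simp [h]
    · simp only [h, if_false]
      rw [ih (n / b) ((n % b).digitChar :: l), ih (n / b) [(n % b).digitChar]]
      simp

-- fuel irrelevance for toDigitsCore with empty accumulator, given enough fuel
lemma toDigitsCore_fuel : ∀ (n f f' : Nat), n < f → n < f' →
    Nat.toDigitsCore 10 f n [] = Nat.toDigitsCore 10 f' n [] := by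
  intro n
  induction n using Nat.strong_induction_on with
  | _ n ih =>
    intro f f' hf hf'
    match f, f' with
    | f + 1, f' + 1 =>
      rw [toDigitsCore_succ, toDigitsCore_succ]
      by_cases h : n / 10 = 0
      · simp [h]
      · simp only [h, if_false]
        have hlt : n / 10 < n := Nat.div_lt_self (by omega) (by omega)
        rw [toDigitsCore_acc 10 f, toDigitsCore_acc 10 f',
          ih (n / 10) hlt f f' (by omega) (by omega)]

lemma toDigits_lt (n : Nat) (h : n < 10) : Nat.toDigits 10 n = [Nat.digitChar n] := by
  rw [Nat.toDigits, toDigitsCore_succ, if_pos (Nat.div_eq_of_lt h), Nat.mod_eq_of_lt h]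

lemma toDigits_ge (n : Nat) (h : 10 ≤ n) :
    Nat.toDigits 10 n = Nat.toDigits 10 (n / 10) ++ [Nat.digitChar (n % 10)] := by
  have h0 : n / 10 ≠ 0 := by omega
  rw [Nat.toDigits, toDigitsCore_succ, if_neg h0, toDigitsCore_acc, Nat.toDigits,
    toDigitsCore_fuel (n / 10) n (n / 10 + 1)
      (Nat.div_lt_self (by omega) (by omega)) (by omega)]

lemma toDigits_ne_nil (n : Nat) : Nat.toDigits 10 n ≠ [] := by
  by_cases h : n < 10
  · simp [toDigits_lt n h]
  · simp [toDigits_ge n (by omega)]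

lemma digitChar_inj (v w : Nat) (hv : v < 10) (hw : w < 10)
    (h : Nat.digitChar v = Nat.digitChar w) : v = w := by
  interval_cases v <;> interval_cases w <;> simp_all [Nat.digitChar]

-- toChars b is the single digit char of v (v < 10) exactly when b = v
lemma toChars_singleton (b : Int) (v : Nat) (hv : v < 10) :
    PySem.Int.toChars b = [Nat.digitChar v] ↔ b = (v : Int) := by
  constructor
  · intro h
    unfold PySem.Int.toChars at h
    split at h
    · -- b < 0 : '-' :: toDigits …, head would be '-' ≠ digitChar v
      have hh : '-' = Nat.digitChar v := by
        cases hd : Nat.toDigits 10 b.natAbs with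
        | nil => exact absurd hd (toDigits_ne_nil _)
        | cons c cs => rw [hd] at h; exact (List.cons.injEq _ _ _ _).mp h |>.1 ▸ rfl
      interval_cases v <;> simp [Nat.digitChar] at hh
    · by_cases hb : b.toNat < 10
      · rw [toDigits_lt _ hb] at h
        have := digitChar_inj _ _ hb hv (List.singleton_injective h ▸ rfl)
        omega
      · rw [toDigits_ge _ (by omega)] at h
        have hlen : (Nat.toDigits 10 (b.toNat / 10)).length + 1 = 1 := by
          simpa using congrArg List.length h
        have hnil : Nat.toDigits 10 (b.toNat / 10) = [] :=
          List.length_eq_zero_iff.mp (by omega)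
        exact absurd hnil (toDigits_ne_nil _)
  · intro h
    subst h
    unfold PySem.Int.toChars
    rw [if_neg (by omega)]
    simpa using toDigits_lt v hv

-- the per-character predicate B applies
def badChar (bblist : List Int) (d : Char) : Bool :=
  PySem.Set.contains (PySem.Set.ofList (bblist.map PySem.Int.toStr)) (String.ofList [d])

lemma toStr_eq_singleton (b : Int) (v : Nat) (hv : v < 10) :
    PySem.Int.toStr b = String.ofList [Nat.digitChar v] ↔ b = (v : Int) := by
  rw [← toChars_singleton b v hv, ← PySem.Int.toList_toStr]
  constructor
  · intro h; rw [h, String.toList_ofList]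
  · intro h; rw [← h, String.ofList_toList]

lemma badChar_digit (bblist : List Int) (v : Nat) (hv : v < 10) :
    badChar bblist (Nat.digitChar v) = bblist.contains (v : Int) := by
  unfold badChar
  rw [PySem.Set.contains_eq_listContains]
  rcases hc : bblist.contains ((v : Nat) : Int) with _ | _ <;>
    simp only [List.contains_eq_mem, decide_eq_false_iff_not, decide_eq_true_eq] at hc ⊢
  · intro hmem
    rw [PySem.Set.mem_ofList] at hmem
    obtain ⟨b, hb, hbe⟩ := List.mem_map.mp hmem
    exact hc ((toStr_eq_singleton b v hv).mp hbe ▸ hb)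
  · rw [PySem.Set.mem_ofList]
    exact List.mem_map.mpr ⟨(v : Int), hc, (toStr_eq_singleton _ v hv).mpr rfl⟩

-- the main loop/string correspondence, for positive n
lemma loop_eq_all (bblist : List Int) : ∀ (m : Nat), 1 ≤ m →
    checkCanLoop (m : Int) bblist = (Nat.toDigits 10 m).all (fun d => !(badChar bblist d)) := by
  intro m
  induction m using Nat.strong_induction_on with
  | _ m ih =>
    intro hm
    rw [checkCanLoop, dif_pos (by exact_mod_cast hm)]
    have hmod : PySem.Int.mod (m : Int) 10 = ((m % 10 : Nat) : Int) := PySem.Int.mod_natCast m 10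
    have hdiv : PySem.Int.floordiv (m : Int) 10 = ((m / 10 : Nat) : Int) := PySem.Int.floordiv_natCast m 10
    by_cases hlt : m < 10
    · rw [toDigits_lt m hlt]
      have hmm : m % 10 = m := Nat.mod_eq_of_lt hlt
      rw [hmod, hmm, hdiv, Nat.div_eq_of_lt hlt]
      rcases h : bblist.contains ((m : Nat) : Int) with _ | _
      · rw [checkCanLoop]
        simp_all [badChar_digit bblist m hlt, List.contains_eq_mem]
      · simp_all [badChar_digit bblist m hlt, List.contains_eq_mem]
    · rw [toDigits_ge m (by omega), List.all_append]
      have hrec := ih (m / 10) (Nat.div_lt_self (by omega) (by omega)) (by omega)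
      rcases h : bblist.contains ((m % 10 : Nat) : Int) with _ | _
      · rw [hmod, h, hdiv, hrec]
        simp_all [badChar_digit bblist (m % 10) (Nat.mod_lt m (by omega)),
          List.contains_eq_mem, Bool.and_comm]
      · rw [hmod, h]
        simp_all [badChar_digit bblist (m % 10) (Nat.mod_lt m (by omega)), List.contains_eq_mem]

-- ===== VERDICT (by name: the statement is the Claim_ definition above) =====
theorem check_can_spec : Claim_equal_check_can := by
  intro ccN bblist _
  unfold Spec_check_can check_can check_can_alt
  by_cases hneg : ccN < 0
  · rw [if_neg (show ¬ccN = 0 by omega), if_pos hneg, if_pos hneg]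
  · rw [if_neg hneg]
    by_cases h0 : ccN = 0
    · subst h0
      rw [if_pos rfl]
      have hl : (PySem.Int.toStr (0 : Int)).toList = [Nat.digitChar 0] := rfl
      rw [hl]
      have hb := badChar_digit bblist 0 (by omega)
      unfold badChar at hb
      simp only [List.all_cons, List.all_nil, Bool.and_true, hb]
      rcases h : bblist.contains ((0 : Nat) : Int) with _ | _ <;> simp_all
    · rw [if_neg h0]
      have hcast : ccN = ((ccN.toNat : Nat) : Int) := by omega
      rw [hcast, loop_eq_all bblist ccN.toNat (by omega)]
      have hstr : (PySem.Int.toStr ((ccN.toNat : Nat) : Int)).toList = Nat.toDigits 10 ccN.toNat := by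
        rw [PySem.Int.toList_toStr]
        unfold PySem.Int.toChars
        rw [if_neg (by omega)]
        congr 1
      rw [hstr]
      rfl
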